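-- pv_equiv track=rewrite | github.com/srichandra707/AI_Interviewer_Innov8_3.0_Finals | agenticInterviewer/agent.py | detect_top_issue
-- ===== SOURCE A (Python) =====
-- from typing import Any, Dict, List, Tuple
--
-- def detect_top_issue(behav_details: Dict[str, Any]) -> str:
--     if not behav_details:
--         return "style"
--     statuses = [c.get("status") for c in behav_details.get("cases", [])]
--     if any(s == "syntax_error" for s in statuses):
--         return "syntax"
--     if any(s == "runtime_error" for s in statuses):
--         return "runtime"
--     if any(s == "timeout" for s in statuses):
--         return "tle"
--     if any(s == "wrong" for s in statuses):
--         return "logic"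
--     return None
-- ===== SOURCE B (Python) =====
-- def detect_top_issue(behav_details):
--     if not behav_details:
--         return "style"
--     rank = {"syntax_error": 0, "runtime_error": 1, "timeout": 2, "wrong": 3}
--     labels = ["syntax", "runtime", "tle", "logic"]
--     best = None
--     for c in behav_details.get("cases", []):
--         r = rank.get(c.get("status"))
--         if r is not None and (best is None or r < best):
--             best = r
--     return None if best is None else labels[best]
-- ===== Notes on version B (the rewrite author's own statement) =====
-- stated objective: alternative
-- what changed: Replaces A's four separate any-scans over an intermediate status list with a single fold that tracks the minimum priority rank seen, translated back to a label at the end.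
import Mathlib
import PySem

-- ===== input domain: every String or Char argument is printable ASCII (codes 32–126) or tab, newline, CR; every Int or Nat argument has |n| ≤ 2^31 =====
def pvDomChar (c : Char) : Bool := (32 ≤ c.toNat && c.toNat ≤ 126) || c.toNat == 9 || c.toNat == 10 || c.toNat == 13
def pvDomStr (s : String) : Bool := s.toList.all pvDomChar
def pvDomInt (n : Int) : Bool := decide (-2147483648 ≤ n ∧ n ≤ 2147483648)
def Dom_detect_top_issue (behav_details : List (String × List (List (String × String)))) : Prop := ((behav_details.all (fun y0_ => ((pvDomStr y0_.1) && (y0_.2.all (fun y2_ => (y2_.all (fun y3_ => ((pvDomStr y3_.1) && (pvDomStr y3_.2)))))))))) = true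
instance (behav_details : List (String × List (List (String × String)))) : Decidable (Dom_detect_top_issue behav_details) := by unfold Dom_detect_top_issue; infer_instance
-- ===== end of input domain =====

-- B replaces A's four separate any-scans over the status list with a single fold tracking the minimum priority rank (alternative decomposition; same asymptotic cost).

-- ===== PORT A =====
def detect_top_issue (behav_details : List (String × List (List (String × String)))) : Option String :=
  if behav_details = [] then some "style"
  else
    let statuses := ((PySem.Dict.mk behav_details).getD "cases" []).map
      (fun c => (PySem.Dict.mk c).get? "status")
    if statuses.any (fun s => s == some "syntax_error") then some "syntax"
    else if statuses.any (fun s => s == some "runtime_error") then some "runtime"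
    else if statuses.any (fun s => s == some "timeout") then some "tle"
    else if statuses.any (fun s => s == some "wrong") then some "logic"
    else none

-- ===== PORT B =====
-- rank.get(c.get("status")): rank has string keys, so a None status never matches
def pvRankB (s : Option String) : Option Int :=
  match s with
  | none => none
  | some s => (PySem.Dict.mk [("syntax_error", (0 : Int)), ("runtime_error", 1), ("timeout", 2), ("wrong", 3)]).get? s

def detect_top_issue_alt (behav_details : List (String × List (List (String × String)))) : Option String :=
  if behav_details = [] then some "style"
  else
    let labels : List String := ["syntax", "runtime", "tle", "logic"]
    let best := ((PySem.Dict.mk behav_details).getD "cases" []).foldl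
      (fun b c =>
        match pvRankB ((PySem.Dict.mk c).get? "status") with
        | none => b
        | some r =>
          match b with
          | none => some r
          | some b0 => if r < b0 then some r else b) none
    match best with
    | none => none
    | some r => PySem.List.pyGet? labels r

-- ===== PRECONDITION & SPEC =====
def Spec_detect_top_issue (behav_details : List (String × List (List (String × String)))) (out : Option String) : Prop := out = detect_top_issue_alt behav_details
instance (behav_details : List (String × List (List (String × String)))) (out : Option String) : Decidable (Spec_detect_top_issue behav_details out) := by unfold Spec_detect_top_issue; infer_instance

-- ===== CLAIM (what is proved, stated in full; the proofs are below) =====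
def Claim_equal_detect_top_issue : Prop := ∀ (behav_details : List (String × List (List (String × String)))), Dom_detect_top_issue behav_details → Spec_detect_top_issue behav_details (detect_top_issue behav_details)

-- ===== LEMMAS AND PROOFS =====

-- option minimum
def pvOMin (a b : Option Int) : Option Int :=
  match a, b with
  | none, b => b
  | a, none => a
  | some x, some y => some (min x y)

-- B's loop body, named
def pvStep (b : Option Int) (c : List (String × String)) : Option Int :=
  match pvRankB ((PySem.Dict.mk c).get? "status") with
  | none => b
  | some r =>
    match b with
    | none => some r
    | some b0 => if r < b0 then some r else b

-- minimum rank of a list of cases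
def pvCF (cases : List (List (String × String))) : Option Int :=
  cases.foldr (fun c acc => pvOMin (pvRankB ((PySem.Dict.mk c).get? "status")) acc) none

theorem pvCF_cons (c : List (String × String)) (cs : List (List (String × String))) :
    pvCF (c :: cs) = pvOMin (pvRankB ((PySem.Dict.mk c).get? "status")) (pvCF cs) := rfl

theorem pvStep_eq (b : Option Int) (c : List (String × String)) :
    pvStep b c = pvOMin b (pvRankB ((PySem.Dict.mk c).get? "status")) := by
  unfold pvStep pvOMin
  cases pvRankB ((PySem.Dict.mk c).get? "status") with
  | none => cases b <;> rfl
  | some r =>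
    cases b with
    | none => rfl
    | some b0 =>
      show (if r < b0 then some r else some b0) = some (min b0 r)
      by_cases h : r < b0
      · rw [if_pos h, min_def, if_neg (by omega : ¬ b0 ≤ r)]
      · rw [if_neg h, min_def, if_pos (by omega : b0 ≤ r)]

theorem pvOMin_assoc (a b c : Option Int) : pvOMin (pvOMin a b) c = pvOMin a (pvOMin b c) := by
  cases a <;> cases b <;> cases c <;> simp [pvOMin, min_assoc]

theorem pvFoldl_eq_cf (cases : List (List (String × String))) :
    ∀ b : Option Int, cases.foldl pvStep b = pvOMin b (pvCF cases) := by
  induction cases with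
  | nil => intro b; cases b <;> rfl
  | cons c cs ih =>
    intro b
    rw [List.foldl_cons, ih, pvStep_eq, pvCF_cons, pvOMin_assoc]

theorem pvRankB_cases (s : Option String) :
    pvRankB s = none ∨ pvRankB s = some 0 ∨ pvRankB s = some 1 ∨ pvRankB s = some 2 ∨ pvRankB s = some 3 := by
  cases s with
  | none => left; rfl
  | some s =>
    simp only [pvRankB, PySem.Dict.get?_mk_cons]
    split_ifs <;> simp [PySem.Dict.get?]

theorem pvRankB_eq (s : Option String) :
    (pvRankB s = some 0 ↔ (s == some "syntax_error") = true) ∧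
    (pvRankB s = some 1 ↔ (s == some "runtime_error") = true) ∧
    (pvRankB s = some 2 ↔ (s == some "timeout") = true) ∧
    (pvRankB s = some 3 ↔ (s == some "wrong") = true) := by
  cases s with
  | none => simp [pvRankB]
  | some s =>
    simp only [pvRankB, PySem.Dict.get?_mk_cons, beq_iff_eq, Option.some.injEq]
    split_ifs with a b c d <;> simp_all [PySem.Dict.get?, eq_comm]

theorem pvOMin_ifchain (r : Option Int) (p1 p2 p3 p4 b1 b2 b3 b4 : Bool)
    (hr : r = none ∨ r = some 0 ∨ r = some 1 ∨ r = some 2 ∨ r = some 3)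
    (h1 : r = some 0 ↔ p1 = true) (h2 : r = some 1 ↔ p2 = true)
    (h3 : r = some 2 ↔ p3 = true) (h4 : r = some 3 ↔ p4 = true) :
    pvOMin r (if b1 = true then some 0 else if b2 = true then some 1 else if b3 = true then some 2 else if b4 = true then some 3 else none)
    = (if (p1 || b1) = true then some 0 else if (p2 || b2) = true then some 1 else if (p3 || b3) = true then some 2 else if (p4 || b4) = true then some 3 else none) := by
  rcases hr with h | h | h | h | h <;> subst h <;>
    simp only [Option.some.injEq, show ¬((0:Int) = 1) by omega, show ¬((0:Int) = 2) by omega,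
      show ¬((0:Int) = 3) by omega, show ¬((1:Int) = 0) by omega, show ¬((1:Int) = 2) by omega,
      show ¬((1:Int) = 3) by omega, show ¬((2:Int) = 0) by omega, show ¬((2:Int) = 1) by omega,
      show ¬((2:Int) = 3) by omega, show ¬((3:Int) = 0) by omega, show ¬((3:Int) = 1) by omega,
      show ¬((3:Int) = 2) by omega, false_iff, true_iff, reduceCtorEq] at h1 h2 h3 h4 <;>
    simp only [Bool.not_eq_true] at * <;>
    (try subst h1) <;> (try subst h2) <;> (try subst h3) <;> (try subst h4) <;>
    revert b1 b2 b3 b4 <;> decide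

theorem pvCF_char (cases : List (List (String × String))) :
    pvCF cases =
      (if cases.any (fun c => (PySem.Dict.mk c).get? "status" == some "syntax_error") then some 0
       else if cases.any (fun c => (PySem.Dict.mk c).get? "status" == some "runtime_error") then some 1
       else if cases.any (fun c => (PySem.Dict.mk c).get? "status" == some "timeout") then some 2
       else if cases.any (fun c => (PySem.Dict.mk c).get? "status" == some "wrong") then some 3
       else none) := by
  induction cases with
  | nil => rfl
  | cons c cs ih =>
    rw [pvCF_cons, ih]
    simp only [List.any_cons]
    exact pvOMin_ifchain _ _ _ _ _ _ _ _ _ (pvRankB_cases _)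
      (pvRankB_eq _).1 (pvRankB_eq _).2.1 (pvRankB_eq _).2.2.1 (pvRankB_eq _).2.2.2

-- ===== VERDICT (by name: the statement is the Claim_ definition above) =====
theorem detect_top_issue_spec : Claim_equal_detect_top_issue := by
  intro bd _
  unfold Spec_detect_top_issue detect_top_issue detect_top_issue_alt
  by_cases hbd : bd = []
  · simp [hbd]
  · simp only [if_neg hbd]
    rw [show (fun (b : Option Int) (c : List (String × String)) =>
        match pvRankB ((PySem.Dict.mk c).get? "status") with
        | none => b
        | some r => match b with
          | none => some r
          | some b0 => if r < b0 then some r else b) = pvStep from rfl]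
    rw [pvFoldl_eq_cf, pvCF_char]
    simp only [List.any_map, Function.comp_def]
    split_ifs <;> rfl
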